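-- pv_equiv track=rewrite | github.com/SebastianVintonuke/TDA-Test | ProgramacionDinamica/lunatico.py | c_solucion
-- ===== SOURCE A (Python) =====
-- def c_solucion(ganancias, optimos):
--     solucion = []
--     n = len(optimos) - 1
--     while n >= 0: # O(n)
--         if n == 0:
--             solucion.append(0)
--             break
--         elif n == 1:
--             solucion.append(1 if ganancias[1] > ganancias[0] else 0)
--             break
--         else:
--             si_robo_la_ultima = ganancias[n] + optimos[n - 2]
--             si_no_robo_la_ultima = optimos[n - 1]
--             if si_robo_la_ultima >= si_no_robo_la_ultima:
--                 solucion.append(n)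
--                 n = n - 2
--             else:
--                 n = n - 1
--     solucion.reverse() # O(n)
--     return solucion
-- ===== SOURCE B (Python) =====
-- def c_solucion(ganancias, optimos):
--     # Forward bottom-up DP: for every prefix length keep the chosen-index set as a
--     # persistent linked chain (index, parent), extending it in O(1); the final chain
--     # is flattened once at the end. No backward index walk over optimos.
--     m = len(optimos)
--     if m == 0:
--         return []
--     if m == 1:
--         return [0]
--     prev = (0, None)
--     cur = (1, None) if ganancias[1] > ganancias[0] else (0, None)
--     for k in range(2, m):
--         if ganancias[k] + optimos[k - 2] >= optimos[k - 1]: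
--             prev, cur = cur, (k, prev)
--         else:
--             prev, cur = cur, cur
--     out = []
--     while cur is not None:
--         out.append(cur[0])
--         cur = cur[1]
--     out.reverse()
--     return out
-- ===== Notes on version B (the rewrite author's own statement) =====
-- stated objective: alternative
-- what changed: B replaces A's backward greedy walk over optimos by a forward bottom-up DP that keeps, for each prefix, the solution as a persistent linked chain extended in O(1), flattened once at the end.
import Mathlib
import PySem

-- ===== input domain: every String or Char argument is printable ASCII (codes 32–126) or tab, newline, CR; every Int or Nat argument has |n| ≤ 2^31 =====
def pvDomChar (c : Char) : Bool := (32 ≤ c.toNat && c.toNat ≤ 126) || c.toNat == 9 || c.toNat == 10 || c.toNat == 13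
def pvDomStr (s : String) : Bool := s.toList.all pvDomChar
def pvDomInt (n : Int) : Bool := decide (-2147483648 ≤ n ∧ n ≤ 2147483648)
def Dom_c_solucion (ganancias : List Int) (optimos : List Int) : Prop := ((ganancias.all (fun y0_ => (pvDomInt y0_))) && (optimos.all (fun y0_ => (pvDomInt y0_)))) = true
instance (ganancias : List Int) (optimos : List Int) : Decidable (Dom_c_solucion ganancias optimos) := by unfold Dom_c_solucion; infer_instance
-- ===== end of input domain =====

-- B replaces A's backward greedy walk + reverse by a forward bottom-up DP that builds the
-- solution list of every prefix (carrying the two previous solution lists); same return value on Pre_.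

-- ===== PORT A =====
-- A's while-loop, descending on n, appending chosen indices to `acc` (= `solucion`).
-- Indices read are in range on every Pre_ input, so `pyGetD … 0` coincides with Python's xs[i] there.
def cGoA (g o : List Int) : Nat → List Int → List Int
  | 0, acc => acc ++ [0]
  | 1, acc => acc ++ [if PySem.List.pyGetD g 1 0 > PySem.List.pyGetD g 0 0 then (1 : Int) else 0]
  | n + 2, acc =>
    if PySem.List.pyGetD g ((n : Int) + 2) 0 + PySem.List.pyGetD o (n : Int) 0 ≥ PySem.List.pyGetD o ((n : Int) + 1) 0 then
      cGoA g o n (acc ++ [(n : Int) + 2])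
    else
      cGoA g o (n + 1) acc

def c_solucion (ganancias : List Int) (optimos : List Int) : List Int :=
  if optimos.length = 0 then []
  else (cGoA ganancias optimos (optimos.length - 1) []).reverse

-- ===== PORT B =====
-- B's forward loop `for k in range(2, m)` over the pair (prev, cur) of persistent chains;
-- a chain `(k, parent)` / `None` is represented as `k :: parent` / `[]` (exact: same spine),
-- and the final flatten-then-reverse loop is `.reverse` of that list.
def cStepB (g o : List Int) (st : List Int × List Int) (k : Nat) : List Int × List Int :=
  if PySem.List.pyGetD g (k : Int) 0 + PySem.List.pyGetD o ((k : Int) - 2) 0 ≥ PySem.List.pyGetD o ((k : Int) - 1) 0 then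
    (st.2, (k : Int) :: st.1)
  else
    (st.2, st.2)

def c_solucion_alt (ganancias : List Int) (optimos : List Int) : List Int :=
  if optimos.length = 0 then []
  else if optimos.length = 1 then [0]
  else
    let cur0 : List Int := if PySem.List.pyGetD ganancias 1 0 > PySem.List.pyGetD ganancias 0 0 then [1] else [0]
    ((List.range' 2 (optimos.length - 2)).foldl (cStepB ganancias optimos) ([0], cur0)).2.reverse

-- ===== PRECONDITION & SPEC =====
-- A raises IndexError exactly when optimos has ≥ 2 elements but ganancias is shorter than optimos
-- (the first loop step already reads ganancias[len(optimos)-1]); Pre_ excludes exactly those inputs.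
def Pre_c_solucion (ganancias : List Int) (optimos : List Int) : Prop :=
  optimos.length ≤ 1 ∨ optimos.length ≤ ganancias.length
instance (ganancias : List Int) (optimos : List Int) : Decidable (Pre_c_solucion ganancias optimos) := by
  unfold Pre_c_solucion; infer_instance

def pvWitness_c_solucion : List Int × List Int := ([1, 5, 2, 7], [1, 5, 5, 12])

def Spec_c_solucion (ganancias : List Int) (optimos : List Int) (out : List Int) : Prop :=
  out = c_solucion_alt ganancias optimos
instance (ganancias : List Int) (optimos : List Int) (out : List Int) : Decidable (Spec_c_solucion ganancias optimos out) := by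
  unfold Spec_c_solucion; infer_instance

-- ===== CLAIM (what is proved, stated in full; the proofs are below) =====
def Claim_equal_c_solucion : Prop := ∀ (ganancias : List Int) (optimos : List Int), Dom_c_solucion ganancias optimos → Pre_c_solucion ganancias optimos → Spec_c_solucion ganancias optimos (c_solucion ganancias optimos)

-- ===== LEMMAS AND PROOFS =====

-- The descending list of chosen indices (as Nats), characterising A's walk;
-- B's chain for the prefix ending at n is exactly this list (cast to Int).
def cD (g o : List Int) : Nat → List Nat
  | 0 => [0]
  | 1 => [if PySem.List.pyGetD g 1 0 > PySem.List.pyGetD g 0 0 then 1 else 0]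
  | n + 2 =>
    if PySem.List.pyGetD g ((n : Int) + 2) 0 + PySem.List.pyGetD o (n : Int) 0 ≥ PySem.List.pyGetD o ((n : Int) + 1) 0 then
      (n + 2) :: cD g o n
    else
      cD g o (n + 1)

def cC (g o : List Int) (n : Nat) : List Int := (cD g o n).map Int.ofNat

lemma cGoA_eq (g o : List Int) : ∀ n acc, cGoA g o n acc = acc ++ (cD g o n).map (fun i => Int.ofNat i) := by
  intro n
  induction n using cD.induct g o with
  | case1 => intro acc; simp [cGoA, cD]
  | case2 => intro acc; simp [cGoA, cD]
  | case3 n h ih =>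
    intro acc
    simp only [cGoA, cD, if_pos h, ih]
    simp
  | case4 n h ih =>
    intro acc
    simp only [cGoA, cD, if_neg h, ih]

lemma cC_zero (g o : List Int) : cC g o 0 = [0] := by simp [cC, cD]

lemma cC_succ_succ (g o : List Int) (n : Nat) :
    cC g o (n + 2) =
      if PySem.List.pyGetD g ((n : Int) + 2) 0 + PySem.List.pyGetD o (n : Int) 0 ≥ PySem.List.pyGetD o ((n : Int) + 1) 0 then
        ((n : Int) + 2) :: cC g o n
      else
        cC g o (n + 1) := by
  simp only [cC, cD]
  split
  · simp only [List.map_cons, Int.ofNat_eq_natCast]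
    push_cast
    ring_nf
  · rfl

lemma foldl_cStepB (g o : List Int) :
    ∀ m, (List.range' 2 m).foldl (cStepB g o) (cC g o 0, cC g o 1) = (cC g o m, cC g o (m + 1)) := by
  intro m
  induction m with
  | zero => simp
  | succ m ih =>
    rw [List.range'_concat, List.foldl_append, ih]
    simp only [one_mul, List.foldl_cons, List.foldl_nil]
    unfold cStepB
    have hc : ((2 + m : Nat) : Int) = (m : Int) + 2 := by push_cast; ring
    rw [hc]
    have ha : ((m : Int) + 2 - 2) = (m : Int) := by ring
    have hb : ((m : Int) + 2 - 1) = (m : Int) + 1 := by ring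
    rw [ha, hb, cC_succ_succ g o m]
    split <;> simp

-- ===== VERDICT (by name: the statement is the Claim_ definition above) =====
theorem c_solucion_spec : Claim_equal_c_solucion := by
  intro g o _ _
  unfold Spec_c_solucion c_solucion c_solucion_alt
  by_cases h0 : o.length = 0
  · simp [h0]
  · simp only [if_neg h0]
    have hA : (cGoA g o (o.length - 1) []).reverse = (cC g o (o.length - 1)).reverse := by
      rw [cGoA_eq g o (o.length - 1) []]
      simp [cC]
    by_cases h1 : o.length = 1
    · rw [hA]; simp [h1, cC_zero]
    · simp only [if_neg h1]
      have hm : o.length - 2 + 1 = o.length - 1 := by omega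
      have hcur : (if PySem.List.pyGetD g 1 0 > PySem.List.pyGetD g 0 0 then ([1] : List Int) else [0]) = cC g o 1 := by
        simp [cC, cD]; split <;> simp
      rw [hA, hcur, ← cC_zero g o, foldl_cStepB g o (o.length - 2), hm]
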